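-- pv_equiv track=rewrite | github.com/764664/BioSE | author_network.py | build_author_network
-- ===== SOURCE A (Python) =====
-- import itertools
--
-- def build_author_network(papers):
--     h = {}
--     for paper in papers:
--         if 'Author' in paper:
--             authors = paper['Author'].split(", ")
--             if len(authors) > 1:
--                 for pair in itertools.combinations(authors, 2):
--                     pair = sorted(pair)
--                     if pair[0] not in h:
--                         h[pair[0]] = {}
--                     if pair[1] not in h[pair[0]]:
--                         h[pair[0]][pair[1]] = 0
--                     h[pair[0]][pair[1]] += 1
--                     if pair[1] not in h:
--                         h[pair[1]] = {}
--                     if pair[0] not in h[pair[1]]: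
--                         h[pair[1]][pair[0]] = 0
--                     h[pair[1]][pair[0]] += 1
--     return h
-- ===== SOURCE B (Python) =====
-- import itertools
--
-- def build_author_network(papers):
--     # Pass 1: count each unordered co-author pair once, keyed by the sorted pair.
--     counts = {}
--     for paper in papers:
--         if 'Author' in paper:
--             authors = paper['Author'].split(", ")
--             if len(authors) > 1:
--                 for x, y in itertools.combinations(authors, 2):
--                     key = (y, x) if y < x else (x, y)
--                     counts[key] = counts.get(key, 0) + 1
--     # Pass 2: materialize the symmetric nested adjacency dict from the edge counts.
--     h = {}
--     for (a, b), c in counts.items():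
--         h.setdefault(a, {})
--         h[a][b] = h[a].get(b, 0) + c
--         h.setdefault(b, {})
--         h[b][a] = h[b].get(a, 0) + c
--     return h
-- ===== Notes on version B (the rewrite author's own statement) =====
-- stated objective: alternative
-- what changed: B first aggregates all co-author pairs into a flat edge-count dict keyed by the sorted pair (one pass over papers), then materializes the symmetric nested adjacency dict from those counts in a second pass, instead of A's per-occurrence four-branch update of the nested dict.
import Mathlib
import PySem

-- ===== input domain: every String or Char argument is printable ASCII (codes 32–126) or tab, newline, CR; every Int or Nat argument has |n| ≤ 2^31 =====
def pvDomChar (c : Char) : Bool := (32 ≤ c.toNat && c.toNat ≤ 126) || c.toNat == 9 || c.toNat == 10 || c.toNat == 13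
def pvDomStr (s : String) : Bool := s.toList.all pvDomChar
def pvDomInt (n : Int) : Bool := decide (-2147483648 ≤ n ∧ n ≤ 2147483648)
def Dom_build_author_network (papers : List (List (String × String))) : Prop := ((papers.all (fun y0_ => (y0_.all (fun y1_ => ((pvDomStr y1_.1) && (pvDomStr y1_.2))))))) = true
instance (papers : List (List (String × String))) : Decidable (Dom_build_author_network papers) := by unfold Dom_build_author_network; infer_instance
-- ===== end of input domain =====

-- B replaces A's per-pair-occurrence four-branch nested-dict update by a flat sorted-pair edge
-- counter plus a second pass materializing the symmetric nested dict (objective: alternative).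

-- shared helpers (both Pythons compute these identically):
-- sorted([x, y]) / the conditional swap on a two-element list: Python's '<' on str is
-- code-point lexicographic = Lean's '<' on String (PySem's checked correspondence); exact.
def sortPair (x y : String) : String × String := if y < x then (y, x) else (x, y)

-- itertools.combinations(xs, 2), in Python's order; exact.
def combs : List String → List (String × String)
  | [] => []
  | x :: xs => xs.map (fun y => (x, y)) ++ combs xs

-- ===== PORT A =====
-- A's inner-loop block for one direction (a := pair[0], b := pair[1]):
-- if a not in h: h[a] = {};  if b not in h[a]: h[a][b] = 0;  h[a][b] += 1
def bumpA (h : PySem.Dict String (PySem.Dict String Int)) (a b : String) :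
    PySem.Dict String (PySem.Dict String Int) :=
  let h1 := if h.contains a then h else h.insert a PySem.Dict.empty
  let i1 := h1.getD a PySem.Dict.empty
  let h2 := if i1.contains b then h1 else h1.insert a (i1.insert b 0)
  let i2 := h2.getD a PySem.Dict.empty
  h2.insert a (i2.insert b (i2.getD b 0 + 1))

def stepA (h : PySem.Dict String (PySem.Dict String Int)) (p : String × String) :
    PySem.Dict String (PySem.Dict String Int) :=
  let q := sortPair p.1 p.2   -- pair = sorted(pair)
  bumpA (bumpA h q.1 q.2) q.2 q.1

def paperStepA (h : PySem.Dict String (PySem.Dict String Int)) (paper : List (String × String)) :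
    PySem.Dict String (PySem.Dict String Int) :=
  match List.lookup "Author" paper with   -- 'Author' in paper / paper['Author'] (first match)
  | none => h
  | some s =>
    -- s.split(", "): the separator is a non-empty literal, so split? is never none
    let authors := (PySem.Str.split? s ", ").getD []
    if 1 < authors.length then (combs authors).foldl stepA h else h

def build_author_network (papers : List (List (String × String))) : List (String × List (String × Int)) :=
  ((papers.foldl paperStepA PySem.Dict.empty).items.map (fun kv => (kv.1, kv.2.items)))

-- ===== PORT B =====
-- pass 1 inner step: counts[key] = counts.get(key, 0) + 1, key the sorted pair
def cstep (d : PySem.Dict (String × String) Int) (p : String × String) :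
    PySem.Dict (String × String) Int :=
  let key := sortPair p.1 p.2
  d.insert key (d.getD key 0 + 1)

def paperStepB (d : PySem.Dict (String × String) Int) (paper : List (String × String)) :
    PySem.Dict (String × String) Int :=
  match List.lookup "Author" paper with
  | none => d
  | some s =>
    let authors := (PySem.Str.split? s ", ").getD []
    if 1 < authors.length then (combs authors).foldl cstep d else d

-- pass 2 step for one direction: h.setdefault(a, {}); h[a][b] = h[a].get(b, 0) + c
def bumpB (h : PySem.Dict String (PySem.Dict String Int)) (a b : String) (c : Int) :
    PySem.Dict String (PySem.Dict String Int) :=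
  let h1 := h.setdefault a PySem.Dict.empty
  let i1 := h1.getD a PySem.Dict.empty
  h1.insert a (i1.insert b (i1.getD b 0 + c))

def build_author_network_alt (papers : List (List (String × String))) : List (String × List (String × Int)) :=
  let counts := papers.foldl paperStepB PySem.Dict.empty
  let h := counts.items.foldl
    (fun h ec => bumpB (bumpB h ec.1.1 ec.1.2 ec.2) ec.1.2 ec.1.1 ec.2) PySem.Dict.empty
  h.items.map (fun kv => (kv.1, kv.2.items))

-- ===== PRECONDITION & SPEC =====
def Spec_build_author_network (papers : List (List (String × String))) (out : List (String × List (String × Int))) : Prop := out = build_author_network_alt papers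
instance (papers : List (List (String × String))) (out : List (String × List (String × Int))) : Decidable (Spec_build_author_network papers out) := by unfold Spec_build_author_network; infer_instance

-- ===== CLAIM (what is proved, stated in full; the proofs are below) =====
def Claim_equal_build_author_network : Prop := ∀ (papers : List (List (String × String))), Dom_build_author_network papers → Spec_build_author_network papers (build_author_network papers)

-- ===== LEMMAS AND PROOFS =====

-- proof-side normal forms -------------------------------------------------
-- one-direction "create cell if needed, then add c" (normal form of bumpA / bumpB)
def bump1 (h : PySem.Dict String (PySem.Dict String Int)) (a b : String) (c : Int) :
    PySem.Dict String (PySem.Dict String Int) :=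
  h.insert a ((h.getD a PySem.Dict.empty).insert b ((h.getD a PySem.Dict.empty).getD b 0 + c))

def bump2 (h : PySem.Dict String (PySem.Dict String Int)) (q : String × String) (c : Int) :
    PySem.Dict String (PySem.Dict String Int) :=
  bump1 (bump1 h q.1 q.2 c) q.2 q.1 c

-- pure "add c to an existing cell" (no-op if the cell does not exist)
def add1 (h : PySem.Dict String (PySem.Dict String Int)) (a b : String) (c : Int) :
    PySem.Dict String (PySem.Dict String Int) :=
  match h.get? a with
  | none => h
  | some inner =>
    match inner.get? b with
    | none => h
    | some v => h.insert a (inner.insert b (v + c))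

def add2 (h : PySem.Dict String (PySem.Dict String Int)) (q : String × String) (c : Int) :
    PySem.Dict String (PySem.Dict String Int) :=
  add1 (add1 h q.1 q.2 c) q.2 q.1 c

-- cell (a, b) exists
def e1 (h : PySem.Dict String (PySem.Dict String Int)) (a b : String) : Prop :=
  ∃ i v, h.get? a = some i ∧ i.get? b = some v

def e2 (h : PySem.Dict String (PySem.Dict String Int)) (q : String × String) : Prop :=
  e1 h q.1 q.2 ∧ e1 h q.2 q.1

def apply2 (h : PySem.Dict String (PySem.Dict String Int)) (L : List ((String × String) × Int)) :
    PySem.Dict String (PySem.Dict String Int) :=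
  L.foldl (fun h ec => bump2 h ec.1 ec.2) h

def pairsOf (paper : List (String × String)) : List (String × String) :=
  match List.lookup "Author" paper with
  | none => []
  | some s =>
    let authors := (PySem.Str.split? s ", ").getD []
    if 1 < authors.length then combs authors else []

-- add1 reduction lemmas
theorem add1_of_get?_none (h : PySem.Dict String (PySem.Dict String Int)) {a : String}
    (b : String) (c : Int) (hg : h.get? a = none) : add1 h a b c = h := by
  unfold add1; simp only [hg]

theorem add1_of_inner_none (h : PySem.Dict String (PySem.Dict String Int)) {a b : String}
    {i : PySem.Dict String Int} (c : Int) (hg : h.get? a = some i) (hv : i.get? b = none) :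
    add1 h a b c = h := by
  unfold add1; simp only [hg, hv]

theorem add1_of_some (h : PySem.Dict String (PySem.Dict String Int)) {a b : String}
    {i : PySem.Dict String Int} {v : Int} (c : Int) (hg : h.get? a = some i)
    (hv : i.get? b = some v) : add1 h a b c = h.insert a (i.insert b (v + c)) := by
  unfold add1; simp only [hg, hv]

-- normal forms ------------------------------------------------------------
theorem bumpA_eq (h : PySem.Dict String (PySem.Dict String Int)) (a b : String) :
    bumpA h a b = bump1 h a b 1 := by
  unfold bumpA bump1
  by_cases hca : h.contains a
  · simp only [hca, if_true]
    by_cases hcb : (h.getD a PySem.Dict.empty).contains b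
    · simp [hcb]
    · simp [hcb, PySem.Dict.getD_insert_self, PySem.Dict.insert_insert_self,
        PySem.Dict.getD_of_not_contains _ _ (by simpa using hcb)]
  · simp [hca, PySem.Dict.getD_insert_self, PySem.Dict.insert_insert_self,
      PySem.Dict.getD_of_not_contains _ _ (by simpa using hca)]

theorem bumpB_eq (h : PySem.Dict String (PySem.Dict String Int)) (a b : String) (c : Int) :
    bumpB h a b c = bump1 h a b c := by
  unfold bumpB bump1
  by_cases hca : h.contains a
  · simp [PySem.Dict.setdefault_of_contains _ _ hca]
  · simp [PySem.Dict.setdefault_of_not_contains _ _ (by simpa using hca),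
      PySem.Dict.getD_insert_self, PySem.Dict.insert_insert_self,
      PySem.Dict.getD_of_not_contains _ _ (by simpa using hca)]

theorem stepA_eq (h : PySem.Dict String (PySem.Dict String Int)) (p : String × String) :
    stepA h p = bump2 h (sortPair p.1 p.2) 1 := by
  simp [stepA, bump2, bumpA_eq]

-- generic Dict fact: two inserts at distinct keys commute when one key is present
theorem insert_insert_comm_of_contains {κ ν : Type} [BEq κ] [LawfulBEq κ]
    (d : PySem.Dict κ ν) (a x : κ) (u w : ν) (ha : d.contains a = true) (hxa : x ≠ a) :
    (d.insert x w).insert a u = (d.insert a u).insert x w := by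
  have hxa' : (x == a) = false := beq_eq_false_iff_ne.2 hxa
  have hax' : (a == x) = false := beq_eq_false_iff_ne.2 (fun h => hxa h.symm)
  by_cases hx : d.contains x
  · have ha2 : (d.insert x w).contains a = true := by
      simp [PySem.Dict.contains_insert, ha]
    have hx2 : (d.insert a u).contains x = true := by
      simp [PySem.Dict.contains_insert, hx]
    apply PySem.Dict.ext
    rw [PySem.Dict.items_insert_of_contains _ u ha2, PySem.Dict.items_insert_of_contains _ w hx,
      PySem.Dict.items_insert_of_contains _ w hx2, PySem.Dict.items_insert_of_contains _ u ha,
      List.map_map, List.map_map]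
    refine List.map_congr_left (fun p hp => ?_)
    by_cases h1 : p.1 = x <;> by_cases h2 : p.1 = a <;>
      simp [h1, h2, hxa', hax']
  · have ha2 : (d.insert x w).contains a = true := by
      simp [PySem.Dict.contains_insert, ha]
    have hx2 : (d.insert a u).contains x = false := by
      simp [PySem.Dict.contains_insert, hx, hxa']
    apply PySem.Dict.ext
    rw [PySem.Dict.items_insert_of_contains _ u ha2,
      PySem.Dict.items_insert_of_not_contains _ w (by simpa using hx),
      PySem.Dict.items_insert_of_not_contains _ w hx2,
      PySem.Dict.items_insert_of_contains _ u ha, List.map_append]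
    simp [hxa']

-- bump1 / add1 algebra ----------------------------------------------------
theorem merge1 (h : PySem.Dict String (PySem.Dict String Int)) (a b : String) (c c' : Int) :
    bump1 h a b (c + c') = add1 (bump1 h a b c) a b c' := by
  simp [bump1, add1, PySem.Dict.get?_insert_self, PySem.Dict.insert_insert_self, add_assoc]

theorem e1_bump1_self (h : PySem.Dict String (PySem.Dict String Int)) (a b : String) (c : Int) :
    e1 (bump1 h a b c) a b :=
  ⟨_, _, PySem.Dict.get?_insert_self _ _ _, PySem.Dict.get?_insert_self _ _ _⟩

theorem e1_bump1 (h : PySem.Dict String (PySem.Dict String Int)) {a b : String} (x y : String)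
    (c : Int) (he : e1 h a b) : e1 (bump1 h x y c) a b := by
  obtain ⟨i, v, hi, hv⟩ := he
  unfold bump1
  by_cases hax : a = x
  · subst hax
    have hIa : h.getD a PySem.Dict.empty = i := PySem.Dict.getD_of_get?_eq_some _ _ hi
    rw [hIa]
    by_cases hby : b = y
    · subst hby
      exact ⟨_, _, PySem.Dict.get?_insert_self _ _ _, PySem.Dict.get?_insert_self _ _ _⟩
    · exact ⟨_, v, PySem.Dict.get?_insert_self _ _ _,
        by rw [PySem.Dict.get?_insert_of_ne _ _ hby]; exact hv⟩
  · exact ⟨i, v, by rw [PySem.Dict.get?_insert_of_ne _ _ hax]; exact hi, hv⟩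

theorem e1_add1 (h : PySem.Dict String (PySem.Dict String Int)) {a b : String} (x y : String)
    (c : Int) (he : e1 h a b) : e1 (add1 h x y c) a b := by
  cases hg : h.get? x with
  | none => rw [add1_of_get?_none _ _ _ hg]; exact he
  | some inner =>
    cases hgb : inner.get? y with
    | none => rw [add1_of_inner_none _ _ hg hgb]; exact he
    | some v0 =>
      rw [add1_of_some _ _ hg hgb]
      obtain ⟨i, v, hi, hv⟩ := he
      by_cases hax : a = x
      · subst hax
        have hii : i = inner := by rw [hi] at hg; injection hg
        subst hii
        by_cases hby : b = y
        · subst hby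
          exact ⟨_, _, PySem.Dict.get?_insert_self _ _ _, PySem.Dict.get?_insert_self _ _ _⟩
        · exact ⟨_, v, PySem.Dict.get?_insert_self _ _ _,
            by rw [PySem.Dict.get?_insert_of_ne _ _ hby]; exact hv⟩
      · exact ⟨i, v, by rw [PySem.Dict.get?_insert_of_ne _ _ hax]; exact hi, hv⟩

theorem add1_eq_bump1 (h : PySem.Dict String (PySem.Dict String Int)) {a b : String} (c : Int)
    (he : e1 h a b) : add1 h a b c = bump1 h a b c := by
  obtain ⟨i, v, hi, hv⟩ := he
  rw [add1_of_some _ _ hi hv]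
  unfold bump1
  rw [PySem.Dict.getD_of_get?_eq_some _ _ hi, PySem.Dict.getD_of_get?_eq_some _ _ hv]

theorem comm1 (h : PySem.Dict String (PySem.Dict String Int)) {a b : String} (x y : String)
    (c c' : Int) (he : e1 h a b) :
    add1 (bump1 h x y c') a b c = bump1 (add1 h a b c) x y c' := by
  obtain ⟨i, v, hi, hv⟩ := he
  have hca : h.contains a = true := by
    rw [PySem.Dict.contains_eq_isSome_get?, hi]; rfl
  have hcb : i.contains b = true := by
    rw [PySem.Dict.contains_eq_isSome_get?, hv]; rfl
  have hIa : h.getD a PySem.Dict.empty = i := PySem.Dict.getD_of_get?_eq_some _ _ hi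
  have hvb : i.getD b 0 = v := PySem.Dict.getD_of_get?_eq_some _ _ hv
  have hadd : add1 h a b c = h.insert a (i.insert b (v + c)) := add1_of_some _ _ hi hv
  by_cases hax : x = a
  · subst hax
    by_cases hby : y = b
    · subst hby
      have hb1 : bump1 h x y c' = h.insert x (i.insert y (v + c')) := by
        unfold bump1; rw [hIa, hvb]
      have hL : add1 (bump1 h x y c') x y c = h.insert x (i.insert y (v + c' + c)) := by
        rw [hb1, add1_of_some _ c (PySem.Dict.get?_insert_self _ _ _)
          (PySem.Dict.get?_insert_self _ _ _)]
        simp only [PySem.Dict.insert_insert_self]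
      have hR : bump1 (add1 h x y c) x y c' = h.insert x (i.insert y (v + c + c')) := by
        rw [hadd]; unfold bump1
        rw [PySem.Dict.getD_insert_self, PySem.Dict.getD_insert_self]
        simp only [PySem.Dict.insert_insert_self]
      rw [hL, hR]
      have : v + c' + c = v + c + c' := by ring
      rw [this]
    · have hby' : b ≠ y := fun hh => hby hh.symm
      have hb1 : bump1 h x y c' = h.insert x (i.insert y (i.getD y 0 + c')) := by
        unfold bump1; rw [hIa]
      have hL : add1 (bump1 h x y c') x b c
          = h.insert x ((i.insert y (i.getD y 0 + c')).insert b (v + c)) := by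
        rw [hb1, add1_of_some _ c (PySem.Dict.get?_insert_self _ _ _)
          (by rw [PySem.Dict.get?_insert_of_ne _ _ hby']; exact hv)]
        simp only [PySem.Dict.insert_insert_self]
      have hR : bump1 (add1 h x b c) x y c'
          = h.insert x ((i.insert b (v + c)).insert y (i.getD y 0 + c')) := by
        rw [hadd]; unfold bump1
        rw [PySem.Dict.getD_insert_self, PySem.Dict.getD_insert_of_ne _ _ _ hby]
        simp only [PySem.Dict.insert_insert_self]
      rw [hL, hR, insert_insert_comm_of_contains i b y (v + c) _ hcb hby]
  · have hxa' : a ≠ x := fun hh => hax hh.symm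
    have hL : add1 (bump1 h x y c') a b c
        = (bump1 h x y c').insert a (i.insert b (v + c)) :=
      add1_of_some _ c (by unfold bump1; rw [PySem.Dict.get?_insert_of_ne _ _ hxa']; exact hi) hv
    have hR : bump1 (add1 h a b c) x y c'
        = (h.insert a (i.insert b (v + c))).insert x
            ((h.getD x PySem.Dict.empty).insert y ((h.getD x PySem.Dict.empty).getD y 0 + c')) := by
      rw [hadd]; unfold bump1
      rw [PySem.Dict.getD_insert_of_ne _ _ _ hax]
    rw [hL, hR]
    unfold bump1
    exact insert_insert_comm_of_contains h a x _ _ hca hax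

-- bump2 / add2 level ------------------------------------------------------
theorem merge2 (h : PySem.Dict String (PySem.Dict String Int)) (q : String × String) (c c' : Int) :
    bump2 h q (c + c') = add2 (bump2 h q c) q c' := by
  obtain ⟨a, b⟩ := q
  simp only [bump2, add2]
  rw [merge1 h a b c c']
  rw [merge1 _ b a c c']
  rw [← comm1 (bump1 h a b c) b a c' c (e1_bump1_self h a b c)]

theorem e2_bump2_self (h : PySem.Dict String (PySem.Dict String Int)) (q : String × String)
    (c : Int) : e2 (bump2 h q c) q :=
  ⟨e1_bump1 _ q.2 q.1 c (e1_bump1_self h q.1 q.2 c), e1_bump1_self _ q.2 q.1 c⟩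

theorem e2_bump2 (h : PySem.Dict String (PySem.Dict String Int)) {q : String × String}
    (f : String × String) (c : Int) (he : e2 h q) : e2 (bump2 h f c) q :=
  ⟨e1_bump1 _ f.2 f.1 c (e1_bump1 _ f.1 f.2 c he.1),
   e1_bump1 _ f.2 f.1 c (e1_bump1 _ f.1 f.2 c he.2)⟩

theorem add2_eq_bump2 (h : PySem.Dict String (PySem.Dict String Int)) {q : String × String}
    (c : Int) (he : e2 h q) : add2 h q c = bump2 h q c := by
  unfold add2 bump2
  rw [add1_eq_bump1 h c he.1, add1_eq_bump1 _ c (e1_bump1 _ q.1 q.2 c he.2)]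

theorem comm2 (h : PySem.Dict String (PySem.Dict String Int)) {q : String × String}
    (f : String × String) (c c' : Int) (he : e2 h q) :
    add2 (bump2 h f c') q c = bump2 (add2 h q c) f c' := by
  obtain ⟨a, b⟩ := q
  obtain ⟨x, y⟩ := f
  obtain ⟨he1, he2⟩ := he
  simp only [bump2, add2] at *
  rw [comm1 (bump1 h x y c') y x c c' (e1_bump1 _ x y c' he1),
    comm1 h x y c c' he1,
    comm1 (bump1 (add1 h a b c) x y c') y x c c'
      (e1_bump1 _ x y c' (e1_add1 _ a b c he2)),
    comm1 (add1 h a b c) x y c c' (e1_add1 _ a b c he2)]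

theorem applyP (h : PySem.Dict String (PySem.Dict String Int)) {q : String × String} (c : Int)
    (L : List ((String × String) × Int)) (he : e2 h q) :
    apply2 (add2 h q c) L = add2 (apply2 h L) q c := by
  induction L generalizing h with
  | nil => rfl
  | cons ec L ih =>
    simp only [apply2, List.foldl_cons]
    rw [← comm2 h ec.1 c ec.2 he]
    exact ih (bump2 h ec.1 ec.2) (e2_bump2 h ec.1 ec.2 he)

theorem e2_apply2 (h : PySem.Dict String (PySem.Dict String Int)) {q : String × String}
    (L : List ((String × String) × Int)) (he : e2 h q) : e2 (apply2 h L) q := by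
  induction L generalizing h with
  | nil => exact he
  | cons ec L ih => exact ih (bump2 h ec.1 ec.2) (e2_bump2 h ec.1 ec.2 he)

-- list split helpers ------------------------------------------------------
theorem split_of_mem_nodup {α β : Type} [DecidableEq α] (L : List (α × β)) (e : α)
    (hm : e ∈ L.map (·.1)) (hnd : (L.map (·.1)).Nodup) :
    ∃ L1 c L2, L = L1 ++ (e, c) :: L2 ∧ e ∉ L1.map (·.1) ∧ e ∉ L2.map (·.1) := by
  induction L with
  | nil => simp at hm
  | cons p L ih =>
    by_cases hpe : p.1 = e
    · refine ⟨[], p.2, L, ?_, ?_, ?_⟩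
      · rw [← hpe]; rfl
      · simp
      · have h2 : p.1 ∉ L.map (·.1) :=
          ((by simpa only [List.map_cons, List.nodup_cons] using hnd :
            p.1 ∉ L.map (·.1) ∧ (L.map (·.1)).Nodup)).1
        rw [hpe] at h2; exact h2
    · have hm' : e ∈ L.map (·.1) := by
        rcases List.mem_cons.1 (by simpa only [List.map_cons] using hm) with h | h
        · exact absurd h.symm hpe
        · exact h
      have hnd' : (L.map (·.1)).Nodup :=
        ((by simpa only [List.map_cons, List.nodup_cons] using hnd :
          p.1 ∉ L.map (·.1) ∧ (L.map (·.1)).Nodup)).2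
      obtain ⟨L1, c, L2, rfl, h1, h2⟩ := ih hm' hnd'
      refine ⟨p :: L1, c, L2, rfl, ?_, h2⟩
      simp only [List.map_cons, List.mem_cons]
      rintro (h | h)
      · exact hpe h.symm
      · exact h1 h

theorem map_if_id {α β : Type} [BEq α] [LawfulBEq α] (L : List (α × β)) (e : α) (v : α × β)
    (hm : e ∉ L.map (·.1)) : L.map (fun p => if p.1 == e then v else p) = L := by
  conv_rhs => rw [← List.map_id L]
  refine List.map_congr_left (fun p hp => ?_)
  have hne : (p.1 == e) = false := by
    refine beq_eq_false_iff_ne.2 (fun h => hm ?_)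
    exact h ▸ List.mem_map_of_mem (f := fun x => x.1) hp
  simp [hne]

-- main counter lemma ------------------------------------------------------
theorem apply2_append (h : PySem.Dict String (PySem.Dict String Int))
    (L L' : List ((String × String) × Int)) :
    apply2 h (L ++ L') = apply2 (apply2 h L) L' := List.foldl_append ..

theorem main_counter (E : List (String × String)) :
    E.foldl (fun h q => bump2 h q 1) PySem.Dict.empty
      = apply2 PySem.Dict.empty (PySem.Dict.counter E).items := by
  induction E using List.reverseRecOn with
  | nil => rfl
  | append_singleton E e ih =>
    rw [List.foldl_append, List.foldl_cons, List.foldl_nil, ih,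
      PySem.Dict.counter_append_singleton]
    set d := PySem.Dict.counter E with hd
    have hmod : d.modify e 0 (· + 1) = d.insert e (d.getD e 0 + 1) := rfl
    rw [hmod]
    by_cases hc : d.contains e
    · have hnd : d.keys.Nodup := PySem.Dict.nodup_keys_counter E
      have hndm : (d.items.map (·.1)).Nodup := hnd
      have hm : e ∈ d.items.map (·.1) := (PySem.Dict.contains_iff_mem_keys d e).mp hc
      obtain ⟨L1, cc, L2, hLeq, h1, h2⟩ := split_of_mem_nodup d.items e hm hndm
      have hmemi : (e, cc) ∈ d.items := by rw [hLeq]; simp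
      have hgd : d.getD e 0 = cc := PySem.Dict.getD_of_mem_items d hmemi hnd 0
      rw [PySem.Dict.items_insert_of_contains d _ hc, hgd, hLeq,
        List.map_append, List.map_cons, map_if_id L1 e _ h1, map_if_id L2 e _ h2]
      simp only [beq_self_eq_true, if_true]
      rw [apply2_append, apply2_append]
      show bump2 (apply2 (apply2 (apply2 PySem.Dict.empty L1) [(e, cc)]) L2) e 1
        = apply2 (apply2 (apply2 PySem.Dict.empty L1) [(e, cc + 1)]) L2
      have hsingle : ∀ (X : PySem.Dict String (PySem.Dict String Int)) (k : Int),
          apply2 X [(e, k)] = bump2 X e k := fun _ _ => rfl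
      rw [hsingle, hsingle]
      rw [merge2 (apply2 PySem.Dict.empty L1) e cc 1,
        applyP _ 1 L2 (e2_bump2_self _ e cc),
        add2_eq_bump2 _ 1 (e2_apply2 _ L2 (e2_bump2_self _ e cc))]
    · rw [PySem.Dict.items_insert_of_not_contains d _ (by simpa using hc),
        PySem.Dict.getD_of_not_contains d _ (by simpa using hc), zero_add,
        apply2_append]
      rfl

-- reduction of the paper loops to the flat edge list ----------------------
theorem foldA (papers : List (List (String × String)))
    (h : PySem.Dict String (PySem.Dict String Int)) :
    papers.foldl paperStepA h = (papers.flatMap pairsOf).foldl stepA h := by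
  induction papers generalizing h with
  | nil => rfl
  | cons p ps ih =>
    simp only [List.foldl_cons, List.flatMap_cons, List.foldl_append, ih]
    congr 1
    unfold paperStepA pairsOf
    cases List.lookup "Author" p with
    | none => rfl
    | some s =>
      by_cases hl : 1 < ((PySem.Str.split? s ", ").getD ([] : List String)).length <;> simp [hl]

theorem foldB (papers : List (List (String × String)))
    (d : PySem.Dict (String × String) Int) :
    papers.foldl paperStepB d = (papers.flatMap pairsOf).foldl cstep d := by
  induction papers generalizing d with
  | nil => rfl
  | cons p ps ih =>
    simp only [List.foldl_cons, List.flatMap_cons, List.foldl_append, ih]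
    congr 1
    unfold paperStepB pairsOf
    cases List.lookup "Author" p with
    | none => rfl
    | some s =>
      by_cases hl : 1 < ((PySem.Str.split? s ", ").getD ([] : List String)).length <;> simp [hl]

theorem foldl_stepA_map (E : List (String × String))
    (h : PySem.Dict String (PySem.Dict String Int)) :
    E.foldl stepA h = (E.map (fun p => sortPair p.1 p.2)).foldl (fun h q => bump2 h q 1) h := by
  have hs : stepA = fun h p => bump2 h (sortPair p.1 p.2) 1 :=
    funext fun h => funext fun p => stepA_eq h p
  rw [hs, List.foldl_map]

theorem foldl_cstep_counter (E : List (String × String)) :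
    E.foldl cstep PySem.Dict.empty = PySem.Dict.counter (E.map (fun p => sortPair p.1 p.2)) := by
  rw [← PySem.Dict.foldl_insert_getD_add_one_eq_counter, List.foldl_map]
  rfl

theorem apply_bumpB (L : List ((String × String) × Int))
    (h : PySem.Dict String (PySem.Dict String Int)) :
    L.foldl (fun h ec => bumpB (bumpB h ec.1.1 ec.1.2 ec.2) ec.1.2 ec.1.1 ec.2) h
      = apply2 h L := by
  unfold apply2
  simp only [bumpB_eq]
  rfl

-- ===== VERDICT (by name: the statement is the Claim_ definition above) =====
theorem build_author_network_spec : Claim_equal_build_author_network := by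
  intro papers _
  unfold Spec_build_author_network build_author_network build_author_network_alt
  simp only [foldA, foldB, foldl_stepA_map, foldl_cstep_counter, apply_bumpB, main_counter]
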